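-- pv_equiv track=rewrite | github.com/hdhdhdgbd5-ui/openclaw-bot | meta_ensemble.py | select_with_distribution
-- ===== SOURCE A (Python) =====
-- def select_with_distribution(scores, n_select):
--     sorted_nums = sorted(scores.items(), key=lambda x: x[1], reverse=True)
--     selected = []
--     used = set()
--     for num, score in sorted_nums:
--         bucket = num // 10
--         if bucket not in used or len(selected) >= n_select - 1:
--             selected.append(num)
--             used.add(bucket)
--         if len(selected) >= n_select:
--             break
--     # Fill
--     while len(selected) < n_select:
--         for num, score in sorted_nums:
--             if num not in selected:
--                 selected.append(num)
--                 break
--     return sorted(selected[:n_select])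
-- ===== SOURCE B (Python) =====
-- def select_with_distribution(scores, n_select):
--     # One forward pass: pick bucket-distinct high scorers, defer bucket clashes,
--     # then top up from the deferred list -- no restarting scans, no list membership tests.
--     order = [num for num, _ in sorted(scores.items(), key=lambda x: x[1], reverse=True)]
--     chosen = []
--     deferred = []
--     buckets = set()
--     need = n_select
--     for num in order:
--         if need <= 0:
--             break
--         b = num // 10
--         if b in buckets and need >= 2:
--             deferred.append(num)
--         else:
--             chosen.append(num)
--             buckets.add(b)
--             need -= 1
--     if need > 0:
--         chosen += deferred[:need]
--     return sorted(chosen)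
-- ===== Notes on version B (the rewrite author's own statement) =====
-- stated objective: alternative
-- what changed: A's fill phase restarts a full scan of sorted_nums for every remaining slot and tests 'num not in selected' by a list scan; B does one forward pass that defers bucket clashes into a list and tops up from that list's prefix, with set membership only.
import Mathlib
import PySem

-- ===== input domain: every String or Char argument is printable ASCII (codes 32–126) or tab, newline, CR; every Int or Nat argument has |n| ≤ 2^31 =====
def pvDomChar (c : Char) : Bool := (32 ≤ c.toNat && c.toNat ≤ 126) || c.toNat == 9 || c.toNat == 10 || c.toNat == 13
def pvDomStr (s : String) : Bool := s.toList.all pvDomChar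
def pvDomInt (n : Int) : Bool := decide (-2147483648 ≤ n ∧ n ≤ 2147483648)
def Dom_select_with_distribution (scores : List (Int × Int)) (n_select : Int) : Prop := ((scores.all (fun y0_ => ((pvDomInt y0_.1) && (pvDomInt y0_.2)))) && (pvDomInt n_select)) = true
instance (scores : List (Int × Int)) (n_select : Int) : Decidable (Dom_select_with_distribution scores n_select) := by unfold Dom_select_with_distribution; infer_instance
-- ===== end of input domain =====

-- B replaces A's fill phase (restarting 'for' scans with list-membership tests) by a single
-- forward pass that defers bucket clashes into a list and tops up from its prefix (alternative).

-- ===== PORT A =====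
-- the 'for num, score in sorted_nums' loop with its break, state (selected, used)
def aLoop (n : Int) : List (Int × Int) → List Int → PySem.Set Int → (List Int × PySem.Set Int)
  | [], sel, used => (sel, used)
  | (num, _) :: rest, sel, used =>
    let bucket := PySem.Int.floordiv num 10
    let p := if ¬ (PySem.Set.contains used bucket = true) ∨ n - 1 ≤ (sel.length : Int)
             then (sel ++ [num], PySem.Set.add used bucket) else (sel, used)
    if n ≤ (p.1.length : Int) then p else aLoop n rest p.1 p.2

-- the fill 'while' loop; one fuel unit per iteration (fuel = n_select - len(selected), the exact
-- iteration count when the Python loop terminates); find? = the inner 'for … break' scan.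
-- If the scan finds nothing Python loops forever (excluded by Pre_); the port returns sel there.
def aFill (sortedNums : List (Int × Int)) : Nat → List Int → List Int
  | 0, sel => sel
  | fuel + 1, sel =>
    match sortedNums.find? (fun q => ! sel.contains q.1) with
    | some q => aFill sortedNums fuel (sel ++ [q.1])
    | none => sel

def select_with_distribution (scores : List (Int × Int)) (n_select : Int) : List Int :=
  let sorted_nums := PySem.List.sorted (PySem.Dict.ofList scores).items (fun x => x.2) true
  let r := aLoop n_select sorted_nums [] PySem.Set.empty
  let sel := aFill sorted_nums (n_select - r.1.length).toNat r.1
  PySem.List.sorted (PySem.List.slice sel none (some n_select)) (fun x => x) false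

-- ===== PORT B =====
-- Source B's single 'for num in order' pass: state (need, buckets, deferred, chosen);
-- after the loop (or on break) the post-loop 'if need > 0: chosen += deferred[:need]'.
def bLoop : List Int → Int → PySem.Set Int → List Int → List Int → List Int
  | [], need, _, deferred, chosen =>
    if 0 < need then chosen ++ PySem.List.slice deferred none (some need) else chosen
  | num :: rest, need, buckets, deferred, chosen =>
    if need ≤ 0 then chosen
    else
      let b := PySem.Int.floordiv num 10
      if PySem.Set.contains buckets b = true ∧ 2 ≤ need then
        bLoop rest need buckets (deferred ++ [num]) chosen
      else
        bLoop rest (need - 1) (PySem.Set.add buckets b) deferred (chosen ++ [num])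

def select_with_distribution_alt (scores : List (Int × Int)) (n_select : Int) : List Int :=
  let order := (PySem.List.sorted (PySem.Dict.ofList scores).items (fun x => x.2) true).map Prod.fst
  PySem.List.sorted (bLoop order n_select PySem.Set.empty [] []) (fun x => x) false

-- ===== PRECONDITION & SPEC =====
-- Pre_ excludes exactly the inputs on which A DIVERGES (the fill 'while' loop never terminates):
-- 0 < n_select with fewer than n_select distinct keys in scores. A returns on all other inputs.
def Pre_select_with_distribution (scores : List (Int × Int)) (n_select : Int) : Prop :=
  n_select ≤ 0 ∨ n_select ≤ ((PySem.List.dedup (scores.map Prod.fst)).length : Int)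
instance (scores : List (Int × Int)) (n_select : Int) : Decidable (Pre_select_with_distribution scores n_select) := by unfold Pre_select_with_distribution; infer_instance

def pvWitness_select_with_distribution : (List (Int × Int)) × Int := ([(3, 9), (12, 7), (17, 5)], 2)

def Spec_select_with_distribution (scores : List (Int × Int)) (n_select : Int) (out : List Int) : Prop := out = select_with_distribution_alt scores n_select
instance (scores : List (Int × Int)) (n_select : Int) (out : List Int) : Decidable (Spec_select_with_distribution scores n_select out) := by unfold Spec_select_with_distribution; infer_instance

-- ===== CLAIM (what is proved, stated in full; the proofs are below) =====
def Claim_equal_select_with_distribution : Prop := ∀ (scores : List (Int × Int)) (n_select : Int), Dom_select_with_distribution scores n_select → Pre_select_with_distribution scores n_select → Spec_select_with_distribution scores n_select (select_with_distribution scores n_select)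

-- ===== LEMMAS AND PROOFS =====

-- aLoop only appends to sel: membership, nodup and length facts
theorem aLoop_facts (n : Int) (items : List (Int × Int)) (sel : List Int) (used : PySem.Set Int)
    (hnd : (sel ++ items.map Prod.fst).Nodup) :
    (∀ x ∈ sel, x ∈ (aLoop n items sel used).1) ∧
    (∀ x ∈ (aLoop n items sel used).1, x ∈ sel ∨ x ∈ items.map Prod.fst) ∧
    (aLoop n items sel used).1.Nodup ∧
    ((sel.length : Int) < n → ((aLoop n items sel used).1.length : Int) ≤ n) := by
  induction items generalizing sel used with
  | nil =>
    refine ⟨fun x hx => hx, fun x hx => Or.inl hx, ?_, fun h => le_of_lt h⟩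
    simpa using hnd.sublist (List.sublist_append_left sel [])
  | cons hd rest ih =>
    obtain ⟨num, score⟩ := hd
    simp only [aLoop]
    split <;> rename_i hpick
    · -- pick branch: p = (sel ++ [num], _)
      split <;> rename_i hbrk
      · -- break
        refine ⟨fun x hx => List.mem_append_left _ hx, ?_, ?_, fun hlt => ?_⟩
        · intro x hx
          rcases List.mem_append.mp hx with h | h
          · exact Or.inl h
          · simp at h; simp [h]
        · exact hnd.sublist (List.append_sublist_append_left sel |>.2
            (List.singleton_sublist.mpr (by simp)))
        · simp only [List.length_append, List.length_singleton] at hbrk ⊢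
          push_cast at hlt ⊢
          omega
      · -- no break: recurse with sel ++ [num]
        have hnd' : ((sel ++ [num]) ++ rest.map Prod.fst).Nodup := by
          simpa [List.append_assoc] using hnd
        obtain ⟨h1, h2, h3, h4⟩ := ih (sel ++ [num]) (PySem.Set.add used (PySem.Int.floordiv num 10)) hnd'
        refine ⟨fun x hx => h1 x (List.mem_append_left _ hx), ?_, h3, fun _ => ?_⟩
        · intro x hx
          rcases h2 x hx with h | h
          · rcases List.mem_append.mp h with h | h
            · exact Or.inl h
            · simp at h; simp [h]
          · simp [h]
        · apply h4
          simp only [List.length_append, List.length_singleton] at hbrk ⊢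
          push_cast at hbrk ⊢
          omega
    · -- skip branch: p = (sel, used)
      split <;> rename_i hbrk
      · exact ⟨fun x hx => hx, fun x hx => Or.inl hx,
          (List.nodup_append.mp (by simpa using hnd)).1, fun hlt => le_of_lt hlt⟩
      · have hnd' : (sel ++ rest.map Prod.fst).Nodup := by
          refine hnd.sublist ?_
          exact List.append_sublist_append_left sel |>.2 (by simpa using List.sublist_cons_self _ _)
        obtain ⟨h1, h2, h3, h4⟩ := ih sel used hnd'
        refine ⟨h1, fun x hx => ?_, h3, fun hlt => h4 hlt⟩
        rcases h2 x hx with h | h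
        · exact Or.inl h
        · simp [h]

-- find? on pairs = head of the filtered key list
theorem find?_fst (l : List (Int × Int)) (p : Int → Bool) :
    (l.find? (fun q => p q.1)).map Prod.fst = ((l.map Prod.fst).filter p).head? := by
  induction l with
  | nil => simp
  | cons hd rest ih =>
    by_cases h : p hd.1 <;> simp [List.find?, h, ih]

-- the fill loop consumes, in order, the keys of sortedNums not yet selected
theorem aFill_eq (sortedNums : List (Int × Int)) (fuel : Nat) (sel : List Int)
    (hnd : (sortedNums.map Prod.fst).Nodup)
    (hlen : fuel ≤ ((sortedNums.map Prod.fst).filter (fun k => ! sel.contains k)).length) :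
    aFill sortedNums fuel sel
      = sel ++ ((sortedNums.map Prod.fst).filter (fun k => ! sel.contains k)).take fuel := by
  induction fuel generalizing sel with
  | zero => simp [aFill]
  | succ fuel ih =>
    cases hFc : (sortedNums.map Prod.fst).filter (fun k => ! sel.contains k) with
    | nil => rw [hFc] at hlen; simp at hlen
    | cons d t =>
      rw [hFc] at hlen
      have hfind : (sortedNums.find? (fun q => ! sel.contains q.1)).map Prod.fst = some d := by
        have := find?_fst sortedNums (fun k => ! sel.contains k)
        rw [hFc] at this
        simpa using this
      obtain ⟨q, hq, hq1⟩ : ∃ q, sortedNums.find? (fun q => ! sel.contains q.1) = some q ∧ q.1 = d := by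
        cases hq : sortedNums.find? (fun q => ! sel.contains q.1) with
        | none => rw [hq] at hfind; simp at hfind
        | some q => rw [hq] at hfind; exact ⟨q, rfl, by simpa using hfind⟩
      have hFnd : (d :: t).Nodup := hFc ▸ hnd.filter _
      have hdt : d ∉ t := (List.nodup_cons.mp hFnd).1
      have h1 : (sortedNums.map Prod.fst).filter (fun k => ! (sel ++ [d]).contains k)
          = ((sortedNums.map Prod.fst).filter (fun k => ! sel.contains k)).filter (fun k => ! (k == d)) := by
        rw [List.filter_filter]
        apply List.filter_congr
        intro x _
        by_cases hx : x = d <;> by_cases hs : x ∈ sel <;> simp [hx, hs]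
      have hnew : (sortedNums.map Prod.fst).filter (fun k => ! (sel ++ [d]).contains k) = t := by
        rw [h1, hFc]
        have h2 : List.filter (fun k => ! (k == d)) (d :: t) = List.filter (fun k => ! (k == d)) t := by
          simp
        rw [h2]
        apply List.filter_eq_self.mpr
        intro x hx
        simp only [Bool.not_eq_eq_eq_not, Bool.not_true, beq_eq_false_iff_ne, ne_eq]
        rintro rfl; exact hdt hx
      have hlen' : fuel ≤ ((sortedNums.map Prod.fst).filter (fun k => ! (sel ++ [d]).contains k)).length := by
        rw [hnew]; simpa using Nat.le_of_succ_le_succ hlen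
      calc aFill sortedNums (fuel + 1) sel
          = aFill sortedNums fuel (sel ++ [d]) := by
            simp only [aFill, hq, hq1]
        _ = (sel ++ [d]) ++ ((sortedNums.map Prod.fst).filter (fun k => ! (sel ++ [d]).contains k)).take fuel :=
            ih (sel ++ [d]) hlen'
        _ = sel ++ (d :: t).take (fuel + 1) := by
            rw [hnew, List.take_succ_cons]; simp

-- bLoop with no remaining need returns chosen unchanged
theorem bLoop_nonpos (l : List Int) (need : Int) (bk : PySem.Set Int) (df ch : List Int)
    (h : need ≤ 0) : bLoop l need bk df ch = ch := by
  cases l with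
  | nil => simp only [bLoop]; rw [if_neg (by omega)]
  | cons x xs => simp only [bLoop]; rw [if_pos h]

-- the core correspondence between A's first loop (+ the fill it leaves to do) and B's single pass
theorem loop_eq (items : List (Int × Int)) (sel dAcc : List Int) (used : PySem.Set Int) (n : Int)
    (hlt : (sel.length : Int) < n)
    (hnd : (sel ++ dAcc ++ items.map Prod.fst).Nodup) :
    (aLoop n items sel used).1
      ++ ((dAcc ++ items.map Prod.fst).filter
            (fun k => ! (aLoop n items sel used).1.contains k)).take
          ((n - (aLoop n items sel used).1.length).toNat)
      = bLoop (items.map Prod.fst) (n - sel.length) used dAcc sel := by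
  induction items generalizing sel dAcc used with
  | nil =>
    simp only [aLoop, List.map_nil, List.append_nil, bLoop]
    rw [if_pos (by omega : (0:Int) < n - sel.length)]
    rw [PySem.List.slice_to dAcc (by omega : (0:Int) ≤ n - sel.length)]
    have hdisj : ∀ x ∈ dAcc, x ∉ sel := by
      have h2 := (List.nodup_append.mp (show (sel ++ dAcc).Nodup by simpa using hnd)).2.2
      exact fun x hx hxs => h2 x hxs x hx rfl
    have : dAcc.filter (fun k => ! sel.contains k) = dAcc := by
      apply List.filter_eq_self.mpr
      intro x hx
      simpa using hdisj x hx
    rw [this]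
  | cons hd rest ih =>
    obtain ⟨num, score⟩ := hd
    simp only [List.map_cons]
    rw [show bLoop (num :: rest.map Prod.fst) (n - ↑sel.length) used dAcc sel
        = if PySem.Set.contains used (PySem.Int.floordiv num 10) = true ∧ 2 ≤ n - (sel.length : Int) then
            bLoop (rest.map Prod.fst) (n - sel.length) used (dAcc ++ [num]) sel
          else
            bLoop (rest.map Prod.fst) (n - sel.length - 1)
              (PySem.Set.add used (PySem.Int.floordiv num 10)) dAcc (sel ++ [num])
      from by rw [bLoop, if_neg (by omega : ¬ n - (sel.length:Int) ≤ 0)]]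
    by_cases hA : ¬ (PySem.Set.contains used (PySem.Int.floordiv num 10) = true) ∨ n - 1 ≤ (sel.length : Int)
    · -- A picks num
      have hBfalse : ¬ (PySem.Set.contains used (PySem.Int.floordiv num 10) = true ∧ 2 ≤ n - (sel.length : Int)) := by
        rcases hA with h | h
        · exact fun hc => h hc.1
        · intro hc; omega
      rw [if_neg hBfalse]
      simp only [aLoop, if_pos hA]
      by_cases hbrk : n ≤ (((sel ++ [num]).length : Nat) : Int)
      · -- break: selected is full
        rw [if_pos hbrk]
        have hn1 : n = (sel.length : Int) + 1 := by
          simp only [List.length_append, List.length_singleton] at hbrk; push_cast at hbrk; omega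
        have h0 : (n - ((sel ++ [num]).length : Int)).toNat = 0 := by
          simp only [List.length_append, List.length_singleton]; push_cast; omega
        rw [h0, List.take_zero, List.append_nil]
        exact (bLoop_nonpos (rest.map Prod.fst) (n - (sel.length : Int) - 1)
          (PySem.Set.add used (PySem.Int.floordiv num 10)) dAcc (sel ++ [num]) (by omega)).symm
      · -- no break: recurse
        rw [if_neg hbrk]
        have hperm : (sel ++ dAcc ++ (num :: rest.map Prod.fst)).Perm
            ((sel ++ [num]) ++ dAcc ++ rest.map Prod.fst) := by
          simp only [List.append_assoc, List.singleton_append]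
          exact List.Perm.append_left sel List.perm_middle
        have hnd' : ((sel ++ [num]) ++ dAcc ++ rest.map Prod.fst).Nodup :=
          hperm.nodup (by simpa [List.append_assoc] using hnd)
        have hnd2 : ((sel ++ [num]) ++ rest.map Prod.fst).Nodup := by
          have hup : ((sel ++ [num]) ++ (dAcc ++ rest.map Prod.fst)).Nodup := by
            simpa [List.append_assoc] using hnd'
          exact hup.sublist
            ((List.append_sublist_append_left (sel ++ [num])).mpr (List.sublist_append_right _ _))
        have hlt' : (((sel ++ [num]).length : Nat) : Int) < n := by
          simp only [List.length_append, List.length_singleton] at hbrk ⊢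
          push_cast at hbrk ⊢; omega
        have hnum : num ∈ (aLoop n (rest) (sel ++ [num]) (PySem.Set.add used (PySem.Int.floordiv num 10))).1 :=
          (aLoop_facts n rest (sel ++ [num]) _ hnd2).1 num (by simp)
        have hfl : (dAcc ++ num :: rest.map Prod.fst).filter
              (fun k => ! (aLoop n rest (sel ++ [num]) (PySem.Set.add used (PySem.Int.floordiv num 10))).1.contains k)
            = (dAcc ++ rest.map Prod.fst).filter
              (fun k => ! (aLoop n rest (sel ++ [num]) (PySem.Set.add used (PySem.Int.floordiv num 10))).1.contains k) := by
          simp only [List.filter_append, List.filter_cons]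
          have : (! (aLoop n rest (sel ++ [num]) (PySem.Set.add used (PySem.Int.floordiv num 10))).1.contains num) = false := by
            simpa using hnum
          rw [this]
          simp
        rw [hfl]
        have hneed : n - ((sel.length : Int)) - 1 = n - (((sel ++ [num]).length : Nat) : Int) := by
          simp only [List.length_append, List.length_singleton]; push_cast; ring
        rw [hneed]
        exact ih (sel ++ [num]) dAcc (PySem.Set.add used (PySem.Int.floordiv num 10)) hlt' hnd'
    · -- A skips num (bucket clash while more than one slot remains)
      rw [if_pos (by push Not at hA; exact ⟨hA.1, by omega⟩)]
      simp only [aLoop, if_neg hA]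
      rw [if_neg (by omega : ¬ n ≤ ((sel.length : Nat) : Int))]
      have hnd' : (sel ++ (dAcc ++ [num]) ++ rest.map Prod.fst).Nodup := by
        simpa [List.append_assoc] using hnd
      have hgoal := ih sel (dAcc ++ [num]) used hlt hnd'
      simpa [List.append_assoc] using hgoal

-- the keys of dict(scores) are the ordered-dedup of the input keys
theorem keys_ofList_eq (scores : List (Int × Int)) :
    (PySem.Dict.ofList scores).keys = PySem.List.dedup (scores.map Prod.fst) := by
  have h := PySem.Dict.keys_foldl_insert_key (ν := Int) scores (fun p => p.1)
    (fun _ p => p.2) PySem.Dict.empty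
  have h2 : (PySem.Dict.ofList scores).keys
      = PySem.Set.update PySem.Dict.empty.keys (scores.map (fun p => p.1)) := h
  rw [h2]
  simp [PySem.Dict.keys_empty, PySem.Set.update_nil_left]

-- a slice [:n] of a one-element list with n ≤ 0 is empty
theorem slice_singleton_nonpos (x : Int) (n : Int) (hn : n ≤ 0) :
    PySem.List.slice [x] none (some n) = [] := by
  by_cases h0 : n = 0
  · subst h0; rw [PySem.List.slice_to _ le_rfl]; rfl
  · obtain ⟨k, hk, rfl⟩ : ∃ k : Nat, 0 < k ∧ n = -(k : Int) :=
      ⟨(-n).toNat, by omega, by omega⟩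
    rw [PySem.List.slice_to_neg_natCast _ _ hk]
    simp [Nat.sub_eq_zero_of_le hk]

-- ===== VERDICT (by name: the statement is the Claim_ definition above) =====
theorem select_with_distribution_spec : Claim_equal_select_with_distribution := by
  intro scores n hdom hpre
  unfold Spec_select_with_distribution
  simp only [select_with_distribution, select_with_distribution_alt]
  set S := PySem.List.sorted (PySem.Dict.ofList scores).items (fun x => x.2) true with hS
  have hkeysnd : (S.map Prod.fst).Nodup := by
    have hperm : (S.map Prod.fst).Perm ((PySem.Dict.ofList scores).items.map Prod.fst) :=
      (PySem.List.sorted_perm _ _ _).map _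
    exact hperm.nodup_iff.mpr (PySem.Dict.nodup_keys_ofList scores)
  have hlenkeys : (S.map Prod.fst).length = (PySem.List.dedup (scores.map Prod.fst)).length := by
    have : ((PySem.Dict.ofList scores).items.map Prod.fst).length
        = (PySem.List.dedup (scores.map Prod.fst)).length := by
      rw [← keys_ofList_eq]; rfl
    rw [← this]
    simp only [List.length_map]
    exact PySem.List.length_sorted _ _ _
  by_cases hn : n ≤ 0
  · -- n_select ≤ 0: both sides are []
    have hb : bLoop (S.map Prod.fst) n PySem.Set.empty [] [] = [] := by
      cases h : S.map Prod.fst with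
      | nil => simp only [bLoop]; rw [if_neg (by omega)]
      | cons y ys => exact bLoop_nonpos _ _ _ _ _ hn
    rw [hb]
    cases hSc : S with
    | nil =>
      simp only [aLoop, aFill]
      have : (n - (([] : List Int).length : Int)).toNat = 0 := by simp; omega
      rw [this]
      simp only [aFill]
      rw [show PySem.List.slice ([] : List Int) none (some n) = [] by
        rw [PySem.List.slice]; simp]
    | cons q rest' =>
      simp only [aLoop]
      rw [if_pos (Or.inl (by simp [PySem.Set.contains, PySem.Set.empty]))]
      rw [if_pos (by simp only [List.nil_append, List.length_cons, List.length_nil]; push_cast; omega)]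
      have h14 : (n - ((([] ++ [q.1], PySem.Set.empty.add (PySem.Int.floordiv q.1 10)).1 : List Int).length : Int)).toNat = 0 := by
        simp only [List.nil_append, List.length_cons, List.length_nil]; omega
      rw [h14]
      simp only [aFill, List.nil_append]
      rw [slice_singleton_nonpos _ _ hn]
  · -- 0 < n ≤ number of distinct keys
    have hn' : (0:Int) < n := by omega
    have hnk : n ≤ ((S.map Prod.fst).length : Int) := by
      rcases hpre with h | h
      · omega
      · rw [hlenkeys]; exact_mod_cast h
    obtain ⟨hkeep, hsub0, hselnd, hlen0⟩ := aLoop_facts n S [] PySem.Set.empty (by simpa using hkeysnd)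
    have hsub : ∀ x ∈ (aLoop n S [] PySem.Set.empty).1, x ∈ S.map Prod.fst := by
      intro x hx
      rcases hsub0 x hx with h | h
      · simp at h
      · exact h
    have hlen' : (((aLoop n S [] PySem.Set.empty).1.length : Nat) : Int) ≤ n := hlen0 (by simpa using hn')
    have hloop := loop_eq S [] [] PySem.Set.empty n (by simpa using hn') (by simpa using hkeysnd)
    simp only [List.nil_append, List.length_nil, Nat.cast_zero, Int.sub_zero] at hloop
    set sel' := (aLoop n S [] PySem.Set.empty).1 with hsel'
    -- the unselected keys number |keys| - |sel'|
    have hperm2 : ((S.map Prod.fst).filter (fun k => sel'.contains k)).Perm sel' := by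
      apply (List.perm_ext_iff_of_nodup (hkeysnd.filter _) hselnd).mpr
      intro a
      constructor
      · intro ha
        have := (List.mem_filter.mp ha).2
        simpa using this
      · intro ha
        exact List.mem_filter.mpr ⟨hsub a ha, by simpa using ha⟩
    have hflen : ((S.map Prod.fst).filter (fun k => ! sel'.contains k)).length
        = (S.map Prod.fst).length - sel'.length := by
      have h1 : ((S.map Prod.fst).filter (fun k => sel'.contains k)).length = sel'.length :=
        hperm2.length_eq
      have hcong : List.countP (fun a => decide ¬((fun k => sel'.contains k) a = true)) (S.map Prod.fst)
          = ((S.map Prod.fst).filter (fun k => ! sel'.contains k)).length := by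
        rw [← List.countP_eq_length_filter]
        apply List.countP_congr
        intro a _
        by_cases h : sel'.contains a = true <;> simp [h]
      have htot := List.length_eq_countP_add_countP (fun k => sel'.contains k) (l := S.map Prod.fst)
      rw [hcong, List.countP_eq_length_filter, h1] at htot
      omega
    have hfuel : (n - (sel'.length : Int)).toNat
        ≤ ((S.map Prod.fst).filter (fun k => ! sel'.contains k)).length := by
      rw [hflen]; omega
    have hfill := aFill_eq S ((n - (sel'.length : Int)).toNat) sel' hkeysnd hfuel
    rw [hfill]
    rw [hloop]
    -- the filled list has length exactly n, so the [:n] slice is the identity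
    have hblen : (bLoop (S.map Prod.fst) n PySem.Set.empty [] []).length = n.toNat := by
      rw [← hloop]
      simp only [List.length_append, List.length_take]
      omega
    rw [PySem.List.slice_to _ (le_of_lt hn')]
    rw [List.take_of_length_le (le_of_eq hblen)]
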